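-- pv_equiv track=rewrite | github.com/juhang-lee/test-repo | test_time.py | check_11
-- ===== SOURCE A (Python) =====
-- def check_11(n_list):              # 이 함수는 Num이 11의 배수인지를 확인해준다. sum을 계산 후 몫과 나머지값을 return한다.
--     n_list = [1] + n_list
--     sum = 0
--     s = 1
--     for j in range(len(n_list), 0, -1):
--         sum += n_list[j-1]*s
--         s *= -1
--
--     return sum//11, sum%11
-- ===== SOURCE B (Python) =====
-- def check_11(n_list):
--     # Forward subtract-accumulator fold: after processing x, s holds the
--     # alternating sum (last element positive) of the prefix seen so far,
--     # because x - (alt sum of previous prefix) re-signs the whole prefix.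
--     s = 0
--     for x in [1] + n_list:
--         s = x - s
--     return s // 11, s % 11
-- ===== Notes on version B (the rewrite author's own statement) =====
-- stated objective: simpler
-- what changed: Replaces A's descending indexed loop with an explicit toggling sign multiplier by a single forward subtract-accumulator fold (s = x - s), which keeps no sign state, does no indexing and walks the list front-to-back; correctness rests on the identity that x - (alternating sum of the prefix) flips every previous sign.
import Mathlib
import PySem

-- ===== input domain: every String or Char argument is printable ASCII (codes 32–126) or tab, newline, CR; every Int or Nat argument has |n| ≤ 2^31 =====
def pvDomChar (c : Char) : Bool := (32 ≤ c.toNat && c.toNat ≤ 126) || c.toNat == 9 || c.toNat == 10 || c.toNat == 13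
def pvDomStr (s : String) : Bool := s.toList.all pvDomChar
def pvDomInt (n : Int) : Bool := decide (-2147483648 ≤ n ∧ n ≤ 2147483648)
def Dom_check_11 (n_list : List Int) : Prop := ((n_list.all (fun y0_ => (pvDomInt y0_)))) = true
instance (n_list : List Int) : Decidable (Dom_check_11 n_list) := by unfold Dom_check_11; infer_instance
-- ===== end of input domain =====

-- B replaces A's descending indexed loop with a toggling sign multiplier by a single
-- forward subtract-accumulator fold (s = x - s); same O(n) cost, simpler state.

-- ===== PORT A =====
def check_11 (n_list : List Int) : Int × Int :=
  let full : List Int := [1] ++ n_list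
  let p := (PySem.List.pyRange (full.length : Int) 0 (-1)).foldl
      (fun (p : Int × Int) j => (p.1 + PySem.List.pyGetD full (j - 1) 0 * p.2, p.2 * (-1))) (0, 1)
  (PySem.Int.floordiv p.1 11, PySem.Int.mod p.1 11)

-- ===== PORT B =====
def check_11_alt (n_list : List Int) : Int × Int :=
  let s := ([1] ++ n_list).foldl (fun acc x => x - acc) 0
  (PySem.Int.floordiv s 11, PySem.Int.mod s 11)

-- ===== PRECONDITION & SPEC =====
def Spec_check_11 (n_list : List Int) (out : Int × Int) : Prop := out = check_11_alt n_list
instance (n_list : List Int) (out : Int × Int) : Decidable (Spec_check_11 n_list out) := by unfold Spec_check_11; infer_instance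

-- ===== CLAIM (what is proved, stated in full; the proofs are below) =====
def Claim_equal_check_11 : Prop := ∀ (n_list : List Int), Dom_check_11 n_list → Spec_check_11 n_list (check_11 n_list)

-- ===== LEMMAS AND PROOFS =====
-- alternating sum from the front: altSum [a,b,c] = a - b + c
def altSum : List Int → Int
  | [] => 0
  | x :: xs => x - altSum xs

theorem altSum_append_singleton (r : List Int) (x : Int) :
    altSum (r ++ [x]) = altSum r + (-1) ^ r.length * x := by
  induction r with
  | nil => simp [altSum]
  | cons y r ih =>
    simp only [List.cons_append, altSum, ih, List.length_cons, pow_succ]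
    ring

-- A's loop computes the alternating sum of the reversed list (last element positive)
theorem loopA (xs : List Int) : ∀ acc s : Int,
    (PySem.List.pyRange (xs.length : Int) 0 (-1)).foldl
      (fun (p : Int × Int) j => (p.1 + PySem.List.pyGetD xs (j - 1) 0 * p.2, p.2 * (-1))) (acc, s)
    = (acc + s * altSum xs.reverse, s * (-1) ^ xs.length) := by
  induction xs using List.reverseRecOn with
  | nil =>
    intro acc s
    rw [PySem.List.pyRange_neg_one_eq_nil (by simp)]
    simp [altSum]
  | append_singleton zs z ih =>
    intro acc s
    have hlen : ((zs ++ [z]).length : Int) = (zs.length : Int) + 1 := by simp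
    rw [hlen, PySem.List.pyRange_neg_one_cons (by positivity)]
    simp only [List.foldl_cons]
    have hget : PySem.List.pyGetD (zs ++ [z]) ((zs.length : Int) + 1 - 1) 0 = z := by
      have : ((zs.length : Int) + 1 - 1) = ((zs.length : Nat) : Int) := by ring
      rw [this, PySem.List.pyGetD_natCast]
      simp
    rw [hget]
    have hcongr :
        (PySem.List.pyRange ((zs.length : Int) + 1 - 1) 0 (-1)).foldl
          (fun (p : Int × Int) j => (p.1 + PySem.List.pyGetD (zs ++ [z]) (j - 1) 0 * p.2, p.2 * (-1)))
          (acc + z * s, s * (-1))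
        = (PySem.List.pyRange ((zs.length : Int)) 0 (-1)).foldl
          (fun (p : Int × Int) j => (p.1 + PySem.List.pyGetD zs (j - 1) 0 * p.2, p.2 * (-1)))
          (acc + z * s, s * (-1)) := by
      have he : ((zs.length : Int) + 1 - 1) = (zs.length : Int) := by ring
      rw [he]
      apply PySem.List.foldl_congr_mem
      intro p j hj
      have hj' := (PySem.List.mem_pyRange_neg_one).1 hj
      have h0 : (0:Int) ≤ j - 1 := by omega
      have h1 : j - 1 < (zs.length : Int) := by omega
      have h2 : j - 1 < ((zs ++ [z]).length : Int) := by simp; omega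
      rw [PySem.List.pyGetD_eq_getElem _ _ h0 h2, PySem.List.pyGetD_eq_getElem _ _ h0 h1,
        List.getElem_append_left (by omega)]
    rw [hcongr, ih (acc + z * s) (s * (-1))]
    have hrev : (zs ++ [z]).reverse = z :: zs.reverse := by simp
    rw [hrev]
    simp only [altSum, List.length_append, List.length_singleton]
    rw [Prod.mk.injEq]
    exact ⟨by ring, by rw [pow_succ]; ring⟩

-- B's subtract-fold computes the same alternating sum of the reversed list
theorem loopB (xs : List Int) : ∀ acc : Int,
    xs.foldl (fun a x => x - a) acc = altSum xs.reverse + (-1) ^ xs.length * acc := by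
  induction xs with
  | nil => intro acc; simp [altSum]
  | cons x xs ih =>
    intro acc
    simp only [List.foldl_cons, ih, List.reverse_cons, altSum_append_singleton,
      List.length_reverse, List.length_cons, pow_succ]
    ring

-- ===== VERDICT (by name: the statement is the Claim_ definition above) =====
theorem check_11_spec : Claim_equal_check_11 := by
  intro n_list _
  unfold Spec_check_11 check_11 check_11_alt
  simp only
  rw [loopA ([1] ++ n_list) 0 1, loopB ([1] ++ n_list) 0]
  simp
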